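-- pv_equiv track=rewrite | github.com/Anonymousarceus/Time-Series | Time-Series-Anomaly-Detection-main/feature_attribution.py | analyze_feature_patterns
-- ===== SOURCE A (Python) =====
-- from typing import List, Dict, Tuple
--
-- def analyze_feature_patterns(attributions: List[List[str]],
--                             feature_names: List[str]) -> Dict[str, int]:
--     """
--     Analyze patterns in feature attributions.
--
--     Args:
--         attributions (List[List[str]]): Feature attributions for each sample
--         feature_names (List[str]): All feature names
--
--     Returns:
--         Dict[str, int]: Count of how often each feature appears in top contributors
--     """
--     feature_counts = {feature: 0 for feature in feature_names}
--
--     for attribution in attributions: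
--         for feature in attribution:
--             if feature and feature in feature_counts:
--                 feature_counts[feature] += 1
--
--     return feature_counts
-- ===== SOURCE B (Python) =====
-- def analyze_feature_patterns(attributions, feature_names):
--     flat = sorted(f for attribution in attributions for f in attribution if f)
--     runs = {}
--     prev = None
--     n = 0
--     for f in flat:
--         if f == prev:
--             n += 1
--         else:
--             if prev is not None:
--                 runs[prev] = n
--             prev = f
--             n = 1
--     if prev is not None:
--         runs[prev] = n
--     return {feature: runs.get(feature, 0) for feature in feature_names}
-- ===== Notes on version B (the rewrite author's own statement) =====
-- stated objective: alternative
-- what changed: B sorts the flattened non-empty features and derives each count by a run-length-encoding scan over the sorted list (equal elements are adjacent), then projects the run table onto feature_names; A instead pre-seeds a zero dict and does guarded in-place increments per element.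
import Mathlib
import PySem

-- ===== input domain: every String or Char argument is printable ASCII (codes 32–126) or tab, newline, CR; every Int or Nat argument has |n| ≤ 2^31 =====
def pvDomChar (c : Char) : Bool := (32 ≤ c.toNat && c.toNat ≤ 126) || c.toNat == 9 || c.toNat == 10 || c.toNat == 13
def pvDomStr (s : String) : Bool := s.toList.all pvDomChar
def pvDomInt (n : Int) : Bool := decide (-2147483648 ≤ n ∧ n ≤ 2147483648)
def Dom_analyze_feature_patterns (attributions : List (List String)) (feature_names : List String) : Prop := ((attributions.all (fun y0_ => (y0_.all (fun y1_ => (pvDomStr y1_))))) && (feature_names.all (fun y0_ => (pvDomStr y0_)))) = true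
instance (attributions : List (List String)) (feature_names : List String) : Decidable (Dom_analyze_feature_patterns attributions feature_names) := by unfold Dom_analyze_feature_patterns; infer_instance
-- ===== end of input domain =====

-- B sorts the flattened non-empty features and obtains each count by a run-length
-- scan over the sorted list, then projects the run table onto feature_names, instead
-- of A's zero-seeded dict with guarded in-place increments; same result.

-- ===== PORT A =====
def analyze_feature_patterns (attributions : List (List String)) (feature_names : List String) : List (String × Int) :=
  let feature_counts : PySem.Dict String Int :=
    feature_names.foldl (fun d feature => d.insert feature 0) PySem.Dict.empty
  let feature_counts :=
    attributions.foldl (fun d attribution =>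
      attribution.foldl (fun d feature =>
        if feature ≠ "" ∧ d.contains feature then d.modify feature 0 (· + 1) else d) d)
      feature_counts
  feature_counts.items

-- ===== PORT B =====
-- one iteration of B's for-loop over the sorted list: state = (runs, prev, n)
def pvRleStep (st : PySem.Dict String Int × Option String × Int) (f : String) :
    PySem.Dict String Int × Option String × Int :=
  if st.2.1 = some f then (st.1, st.2.1, st.2.2 + 1)
  else
    match st.2.1 with
    | some p => (st.1.insert p st.2.2, some f, 1)
    | none => (st.1, some f, 1)

-- B's trailing 'if prev is not None: runs[prev] = n'
def pvRleFinish (st : PySem.Dict String Int × Option String × Int) : PySem.Dict String Int :=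
  match st.2.1 with
  | some p => st.1.insert p st.2.2
  | none => st.1

def analyze_feature_patterns_alt (attributions : List (List String)) (feature_names : List String) : List (String × Int) :=
  let flat : List String :=
    PySem.List.sorted (attributions.flatMap (fun attribution => attribution.filter (fun f => f ≠ ""))) (fun x => x) false
  let runs : PySem.Dict String Int := pvRleFinish (flat.foldl pvRleStep (PySem.Dict.empty, none, 0))
  (feature_names.foldl (fun d feature => d.insert feature (runs.getD feature 0)) PySem.Dict.empty).items

-- ===== PRECONDITION & SPEC =====
def Spec_analyze_feature_patterns (attributions : List (List String)) (feature_names : List String) (out : List (String × Int)) : Prop := out = analyze_feature_patterns_alt attributions feature_names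
instance (attributions : List (List String)) (feature_names : List String) (out : List (String × Int)) : Decidable (Spec_analyze_feature_patterns attributions feature_names out) := by unfold Spec_analyze_feature_patterns; infer_instance

-- ===== CLAIM (what is proved, stated in full; the proofs are below) =====
def Claim_equal_analyze_feature_patterns : Prop := ∀ (attributions : List (List String)) (feature_names : List String), Dom_analyze_feature_patterns attributions feature_names → Spec_analyze_feature_patterns attributions feature_names (analyze_feature_patterns attributions feature_names)

-- ===== LEMMAS AND PROOFS =====

-- Two dicts with the same (duplicate-free) key list and the same getD at every key have the same items.
theorem pv_items_ext (l l' : List (String × Int))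
    (hk : l.map Prod.fst = l'.map Prod.fst)
    (hnd : (l.map Prod.fst).Nodup)
    (hv : ∀ k, (PySem.Dict.mk l).getD k 0 = (PySem.Dict.mk l').getD k 0) :
    l = l' := by
  induction l generalizing l' with
  | nil => cases l' <;> simp_all
  | cons p t ih =>
    obtain ⟨k, v⟩ := p
    cases l' with
    | nil => simp at hk
    | cons p' t' =>
      obtain ⟨k', v'⟩ := p'
      simp only [List.map_cons, List.cons.injEq] at hk
      obtain ⟨hkk, htk⟩ := hk
      subst hkk
      have hvk := hv k
      simp only [PySem.Dict.getD_eq_get?_getD, PySem.Dict.get?_mk_cons, BEq.rfl,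
        if_pos, Option.getD_some] at hvk
      subst hvk
      have hndt : (t.map Prod.fst).Nodup := (List.nodup_cons.mp hnd).2
      have hknt : k ∉ t.map Prod.fst := (List.nodup_cons.mp hnd).1
      have hknt' : k ∉ t'.map Prod.fst := htk ▸ hknt
      have : t = t' := by
        apply ih t' htk hndt
        intro k''
        by_cases h : k'' = k
        · subst h
          have h1 : (PySem.Dict.mk t).get? k'' = none := by
            rw [PySem.Dict.get?_eq_none_iff_not_mem_keys]
            simpa [PySem.Dict.keys_mk] using hknt
          have h2 : (PySem.Dict.mk t').get? k'' = none := by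
            rw [PySem.Dict.get?_eq_none_iff_not_mem_keys]
            simpa [PySem.Dict.keys_mk] using hknt'
          simp [PySem.Dict.getD_eq_get?_getD, h1, h2]
        · have := hv k''
          simp only [PySem.Dict.getD_eq_get?_getD, PySem.Dict.get?_mk_cons] at this ⊢
          simpa [beq_iff_eq, Ne.symm h] using this
      simp [this]

-- getD after an insert loop whose written value depends only on the key: last write wins.
theorem pv_getD_proj (names : List String) (v : String → Int) (d : PySem.Dict String Int) (k : String) :
    (names.foldl (fun d f => d.insert f (v f)) d).getD k 0
      = if k ∈ names then v k else d.getD k 0 := by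
  induction names generalizing d with
  | nil => simp
  | cons f t ih =>
    simp only [List.foldl_cons, ih, List.mem_cons]
    by_cases h : k ∈ t
    · simp [h]
    · by_cases hk : k = f <;> simp [h, hk, PySem.Dict.getD_insert]

-- A's guarded increment loop preserves the key list.
theorem pv_keys_count_a (l : List String) (d : PySem.Dict String Int) :
    (l.foldl (fun d f => if f ≠ "" ∧ d.contains f then d.modify f 0 (· + 1) else d) d).keys = d.keys := by
  induction l generalizing d with
  | nil => rfl
  | cons f t ih =>
    simp only [List.foldl_cons]
    by_cases h : f ≠ "" ∧ d.contains f
    · rw [if_pos h, ih, PySem.Dict.keys_modify, PySem.Dict.keys_insert_of_contains _ _ h.2]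
    · rw [if_neg h, ih]

theorem pv_keys_count_a_all (ls : List (List String)) (d : PySem.Dict String Int) :
    (ls.foldl (fun d l => l.foldl (fun d f => if f ≠ "" ∧ d.contains f then d.modify f 0 (· + 1) else d) d) d).keys = d.keys := by
  induction ls generalizing d with
  | nil => rfl
  | cons l t ih => simp [ih, pv_keys_count_a]

-- getD after A's guarded increment loop over one attribution list, for a dict whose key list is K.
theorem pv_getD_count_a (l : List String) (K : List String) (d : PySem.Dict String Int)
    (hK : d.keys = K) (k : String) :
    (l.foldl (fun d f => if f ≠ "" ∧ d.contains f then d.modify f 0 (· + 1) else d) d).getD k 0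
      = d.getD k 0 + ((l.filter (fun f => f ≠ "" ∧ f ∈ K)).count k : Int) := by
  induction l generalizing d with
  | nil => simp
  | cons f t ih =>
    simp only [List.foldl_cons]
    have hcont : d.contains f = true ↔ f ∈ K := by
      rw [PySem.Dict.contains_iff_mem_keys, hK]
    by_cases h : f ≠ "" ∧ f ∈ K
    · rw [if_pos ⟨h.1, hcont.mpr h.2⟩,
        ih _ (by rw [PySem.Dict.keys_modify, PySem.Dict.keys_insert_of_contains _ _ (hcont.mpr h.2), hK])]
      rw [List.filter_cons, if_pos (by simpa using h)]
      by_cases hk : k = f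
      · subst hk
        rw [PySem.Dict.getD_modify]
        simp
        ring
      · rw [PySem.Dict.getD_modify]
        simp [hk, Ne.symm hk]
    · have : ¬(f ≠ "" ∧ d.contains f = true) := fun hc => h ⟨hc.1, hcont.mp hc.2⟩
      rw [if_neg this, ih _ hK, List.filter_cons, if_neg (by simpa using h)]

theorem pv_getD_count_a_all (ls : List (List String)) (K : List String) (d : PySem.Dict String Int)
    (hK : d.keys = K) (k : String) :
    (ls.foldl (fun d l => l.foldl (fun d f => if f ≠ "" ∧ d.contains f then d.modify f 0 (· + 1) else d) d) d).getD k 0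
      = d.getD k 0 + (((ls.flatMap (fun a => a)).filter (fun f => f ≠ "" ∧ f ∈ K)).count k : Int) := by
  induction ls generalizing d with
  | nil => simp
  | cons l t ih =>
    simp only [List.foldl_cons]
    rw [ih _ (by rw [pv_keys_count_a, hK]), pv_getD_count_a l K d hK]
    simp only [List.flatMap_cons, List.filter_append, List.count_append]
    push_cast
    ring

-- count of k in a filtered list: 0 unless k itself passes the filter.
theorem pv_count_filter_a (l : List String) (K : List String) (k : String) :
    ((l.filter (fun f => f ≠ "" ∧ f ∈ K)).count k : Int)
      = if k ≠ "" ∧ k ∈ K then (l.count k : Int) else 0 := by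
  by_cases h : k ≠ "" ∧ k ∈ K
  · rw [if_pos h, List.count_filter (by simpa using h)]
  · rw [if_neg h]
    norm_num
    rw [List.count_eq_zero]
    intro hm
    exact h (by simpa using List.of_mem_filter hm)

-- k's count in a nonempty-filtered list: 0 unless k is itself nonempty.
theorem pv_count_filter_b (l : List String) (k : String) :
    ((l.filter (fun f => f ≠ "")).count k : Int) = if k ≠ "" then (l.count k : Int) else 0 := by
  by_cases h : k ≠ ""
  · rw [if_pos h, List.count_filter (by simpa using h)]
  · rw [if_neg h]
    norm_num
    rw [List.count_eq_zero]
    intro hm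
    exact h (by simpa using List.of_mem_filter hm)

-- flattening commutes with the nonempty filter.
theorem pv_filter_flatMap (ls : List (List String)) :
    ls.flatMap (fun a => a.filter (fun f => f ≠ "")) = (ls.flatMap (fun a => a)).filter (fun f => f ≠ "") := by
  induction ls with
  | nil => rfl
  | cons a t ih => rw [List.flatMap_cons, List.flatMap_cons, ih, List.filter_append]

-- B's run-length scan, mid-run invariant: on a sorted tail whose elements are all ≥ the
-- current run value p and not yet in runs, finishing the scan yields the total counts.
theorem pv_rle_go (l : List String) (runs : PySem.Dict String Int) (p : String) (n : Int)
    (hsort : l.Pairwise (fun a b : String => a ≤ b)) (hge : ∀ x ∈ l, p ≤ x)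
    (hfresh : ∀ x ∈ l, x ≠ p → runs.getD x 0 = 0) (k : String) :
    (pvRleFinish (l.foldl pvRleStep (runs, some p, n))).getD k 0
      = (if k = p then n else runs.getD k 0) + (l.count k : Int) := by
  induction l generalizing runs p n with
  | nil => simp [pvRleFinish, PySem.Dict.getD_insert]
  | cons f t ih =>
    obtain ⟨hf, ht⟩ := List.pairwise_cons.mp hsort
    rw [List.foldl_cons]
    by_cases hfp : f = p
    · subst hfp
      have hstep : pvRleStep (runs, some f, n) f = (runs, some f, n + 1) := by
        simp [pvRleStep]
      rw [hstep, ih runs f (n + 1) ht (fun x hx => hge x (List.mem_cons_of_mem _ hx))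
            (fun x hx hne => hfresh x (List.mem_cons_of_mem _ hx) hne)]
      by_cases hk : k = f
      · subst hk
        simp only [List.count_cons, BEq.rfl, if_true]
        push_cast
        ring
      · simp [hk, Ne.symm hk]
    · have hpf : p < f := lt_of_le_of_ne (hge f List.mem_cons_self) (Ne.symm hfp)
      have hne : ¬ ((some p : Option String) = some f) := by
        intro h
        exact hfp (Option.some.inj h).symm
      have hstep : pvRleStep (runs, some p, n) f = (runs.insert p n, some f, 1) := by
        simp [pvRleStep, hne]
      rw [hstep, ih (runs.insert p n) f 1 ht hf
            (fun x hx hne => by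
              have hpx : p < f ∧ f ≤ x := ⟨hpf, hf x hx⟩
              have : x ≠ p := by
                intro h; subst h; exact absurd (lt_of_lt_of_le hpx.1 hpx.2) (lt_irrefl _)
              rw [PySem.Dict.getD_insert, if_neg this]
              exact hfresh x (List.mem_cons_of_mem _ hx) this)]
      rw [PySem.Dict.getD_insert]
      by_cases hk : k = f
      · subst hk
        rw [if_pos rfl, if_neg hfp, hfresh k List.mem_cons_self hfp]
        simp
        omega
      · rw [if_neg hk]
        by_cases hkp : k = p
        · subst hkp
          rw [if_pos rfl]
          simp [Ne.symm hk]
        · rw [if_neg hkp]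
          simp [Ne.symm hk]

-- B's full run-length scan of a sorted list computes every count.
theorem pv_rle_count (s : List String) (hsort : s.Pairwise (fun a b : String => a ≤ b)) (k : String) :
    (pvRleFinish (s.foldl pvRleStep (PySem.Dict.empty, none, 0))).getD k 0 = (s.count k : Int) := by
  cases s with
  | nil => simp [pvRleFinish]
  | cons f t =>
    obtain ⟨hf, ht⟩ := List.pairwise_cons.mp hsort
    rw [List.foldl_cons]
    have hstep : pvRleStep (PySem.Dict.empty, none, 0) f = (PySem.Dict.empty, some f, 1) := by
      simp [pvRleStep]
    rw [hstep, pv_rle_go t PySem.Dict.empty f 1 ht hf (fun x _ _ => by simp)]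
    by_cases hk : k = f
    · subst hk
      simp
      ring
    · simp [hk, Ne.symm hk]

-- ===== VERDICT (by name: the statement is the Claim_ definition above) =====
theorem analyze_feature_patterns_spec : Claim_equal_analyze_feature_patterns := by
  intro attributions feature_names _
  unfold Spec_analyze_feature_patterns analyze_feature_patterns analyze_feature_patterns_alt
  dsimp only
  set K : List String := PySem.Set.update PySem.Dict.empty.keys feature_names with hKdef
  set flat : List String :=
    PySem.List.sorted (attributions.flatMap (fun attribution => attribution.filter (fun f => f ≠ ""))) (fun x => x) false with hflat
  set runs : PySem.Dict String Int := pvRleFinish (flat.foldl pvRleStep (PySem.Dict.empty, none, 0)) with hruns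
  set d0 : PySem.Dict String Int := feature_names.foldl (fun d feature => d.insert feature 0) PySem.Dict.empty with hd0
  set dA : PySem.Dict String Int :=
    attributions.foldl (fun d attribution =>
      attribution.foldl (fun d feature =>
        if feature ≠ "" ∧ d.contains feature then d.modify feature 0 (· + 1) else d) d) d0 with hdA
  set dB : PySem.Dict String Int :=
    feature_names.foldl (fun d feature => d.insert feature (runs.getD feature 0)) PySem.Dict.empty with hdB
  have hkeys0 : d0.keys = K := by
    rw [hd0, PySem.Dict.keys_foldl_insert feature_names (fun _ _ => (0 : Int))]
  have hkeysA : dA.keys = K := by rw [hdA, pv_keys_count_a_all, hkeys0]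
  have hkeysB : dB.keys = K := by
    rw [hdB, PySem.Dict.keys_foldl_insert feature_names (fun _ feature => runs.getD feature 0)]
  have hndA : dA.keys.Nodup := by
    rw [hdA, pv_keys_count_a_all, hd0]
    exact PySem.Dict.nodup_keys_foldl_insert _ _ _ (by simp)
  have hmemK : ∀ k, k ∈ K ↔ k ∈ feature_names := by
    intro k
    rw [hKdef]
    simp [PySem.Dict.keys_empty]
  have hpw : flat.Pairwise (fun a b : String => a ≤ b) := by
    rw [hflat]
    exact PySem.List.sorted_pairwise _ _
  have hrunsk : ∀ k, runs.getD k 0 = if k ≠ "" then (((attributions.flatMap (fun a => a)).count k : Int)) else 0 := by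
    intro k
    rw [hruns, pv_rle_count flat hpw k, hflat,
        (PySem.List.sorted_perm _ _ _).count_eq, pv_filter_flatMap, pv_count_filter_b]
  have hgetD : ∀ k, dA.getD k 0 = dB.getD k 0 := by
    intro k
    rw [hdA, pv_getD_count_a_all attributions K d0 hkeys0 k,
        hdB, pv_getD_proj feature_names (fun f => runs.getD f 0) PySem.Dict.empty k]
    have hgd0 : d0.getD k 0 = if k ∈ feature_names then 0 else PySem.Dict.empty.getD k 0 :=
      pv_getD_proj feature_names (fun _ => (0 : Int)) PySem.Dict.empty k
    rw [hgd0, pv_count_filter_a, hrunsk k]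
    by_cases hm : k ∈ feature_names
    · by_cases hne : k ≠ "" <;>
        simp [hm, hne, (hmemK k).mpr hm]
    · have : k ∉ K := fun hc => hm ((hmemK k).mp hc)
      simp [hm, this]
  obtain ⟨lA⟩ := dA
  obtain ⟨lB⟩ := dB
  apply pv_items_ext
  · show lA.map Prod.fst = lB.map Prod.fst
    have h1 : lA.map Prod.fst = K := hkeysA
    have h2 : lB.map Prod.fst = K := hkeysB
    rw [h1, h2]
  · exact hndA
  · exact hgetD
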